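-- pv_equiv track=rewrite | github.com/facebook/Ax | ax/models/torch/cbo_sac.py | generate_model_space_decomposition
-- ===== SOURCE A (Python) =====
-- from typing import Any, Dict, List, Optional
--
-- def generate_model_space_decomposition(
--     decomposition: Dict[str, List[str]], feature_names: List[str]
-- ) -> Dict[str, List[int]]:
--     # validate input decomposition
--     for param_list in decomposition.values():
--         for param in param_list:
--             assert (
--                 param in feature_names
--             ), f"cannot find parameter {param} in search space"
--
--     # generate parameter index list align with the input arrays
--     decomp_index = {}
--     for context, param_names in decomposition.items():
--         decomp_index[context] = [feature_names.index(p) for p in param_names]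
--     return decomp_index
-- ===== SOURCE B (Python) =====
-- def generate_model_space_decomposition(decomposition, feature_names):
--     # Loop inversion: sweep feature_names once and stamp each index into every
--     # still-unfilled slot bearing that name, then check all slots were filled.
--     items = list(decomposition.items())
--     slots = [[None] * len(ps) for _, ps in items]
--     for i, name in enumerate(feature_names):
--         for row, (_, ps) in zip(slots, items):
--             for j, p in enumerate(ps):
--                 if row[j] is None and p == name:
--                     row[j] = i
--     out = {}
--     for (c, ps), row in zip(items, slots):
--         for p, v in zip(ps, row):
--             assert v is not None, f"cannot find parameter {p} in search space"
--         out[c] = row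
--     return out
-- ===== Notes on version B (the rewrite author's own statement) =====
-- stated objective: alternative
-- what changed: Inverts the loop nesting: instead of scanning feature_names once per parameter (gather), B sweeps feature_names a single time and scatters each index into every still-unfilled slot with that name (first occurrence wins because filled slots are never overwritten), then checks all slots were filled.
import Mathlib
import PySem

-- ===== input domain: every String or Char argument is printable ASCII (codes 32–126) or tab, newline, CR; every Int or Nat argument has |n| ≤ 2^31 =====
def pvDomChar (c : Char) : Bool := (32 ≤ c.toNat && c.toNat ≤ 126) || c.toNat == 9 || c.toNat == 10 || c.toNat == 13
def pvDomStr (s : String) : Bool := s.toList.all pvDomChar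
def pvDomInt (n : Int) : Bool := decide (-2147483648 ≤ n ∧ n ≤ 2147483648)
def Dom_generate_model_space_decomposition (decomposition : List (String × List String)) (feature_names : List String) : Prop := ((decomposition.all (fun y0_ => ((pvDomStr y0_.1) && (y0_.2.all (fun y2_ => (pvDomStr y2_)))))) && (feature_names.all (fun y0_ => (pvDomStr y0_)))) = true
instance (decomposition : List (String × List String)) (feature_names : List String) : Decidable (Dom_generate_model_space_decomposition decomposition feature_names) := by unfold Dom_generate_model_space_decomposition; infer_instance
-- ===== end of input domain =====

-- B inverts the loop nesting: one sweep over feature_names scatters each index into every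
-- still-unfilled slot with that name (gather → scatter); return values proved equal on Pre_.

-- ===== PORT A =====
-- A's validation loop only asserts (no state); where any assert fires A raises, which Pre_
-- excludes. feature_names.index(p) is PySem.List.index?; .getD 0 is unreachable on Pre_.
def generate_model_space_decomposition (decomposition : List (String × List String)) (feature_names : List String) : List (String × List Int) :=
  (decomposition.foldl
    (fun d p =>
      PySem.Dict.insert d p.1 (p.2.map (fun q => (((PySem.List.index? feature_names q).getD 0 : Nat) : Int))))
    PySem.Dict.empty).items

-- ===== PORT B =====
-- one slot per parameter occurrence: `if row[j] is None and p == name: row[j] = i`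
def pvStamp1 (i : Int) (name : String) (s : String × Option Int) : String × Option Int :=
  if s.2.isNone && s.1 == name then (s.1, some i) else s

-- `slots = [[None] * len(ps) for _, ps in items]` (param kept with its slot)
def pvRows (decomposition : List (String × List String)) : List (String × List (String × Option Int)) :=
  decomposition.map (fun c => (c.1, c.2.map (fun p => (p, (none : Option Int)))))

-- sweep feature_names once, stamping every row; then build the result dict. The final
-- assert raises only when a slot is still None, which Pre_ excludes; .getD 0 unreachable.
def generate_model_space_decomposition_alt (decomposition : List (String × List String)) (feature_names : List String) : List (String × List Int) :=
  let filled := (PySem.List.enumerate feature_names).foldl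
      (fun st iv => st.map (fun c => (c.1, c.2.map (pvStamp1 iv.1 iv.2)))) (pvRows decomposition)
  (filled.foldl
    (fun d c => PySem.Dict.insert d c.1 (c.2.map (fun s => s.2.getD 0)))
    PySem.Dict.empty).items

-- ===== PRECONDITION & SPEC =====
-- Pre_ excludes exactly the inputs on which A raises AssertionError: some listed parameter
-- absent from feature_names (B raises there too).
def Pre_generate_model_space_decomposition (decomposition : List (String × List String)) (feature_names : List String) : Prop :=
  (decomposition.all (fun p => p.2.all (fun q => feature_names.contains q))) = true
instance (decomposition : List (String × List String)) (feature_names : List String) : Decidable (Pre_generate_model_space_decomposition decomposition feature_names) := by unfold Pre_generate_model_space_decomposition; infer_instance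

def pvWitness_generate_model_space_decomposition : (List (String × List String)) × List String :=
  ([("c1", ["x", "y"]), ("c2", ["x"])], ["y", "x"])

def Spec_generate_model_space_decomposition (decomposition : List (String × List String)) (feature_names : List String) (out : List (String × List Int)) : Prop := out = generate_model_space_decomposition_alt decomposition feature_names
instance (decomposition : List (String × List String)) (feature_names : List String) (out : List (String × List Int)) : Decidable (Spec_generate_model_space_decomposition decomposition feature_names out) := by unfold Spec_generate_model_space_decomposition; infer_instance

-- ===== CLAIM =====
def Claim_equal_generate_model_space_decomposition : Prop := ∀ (decomposition : List (String × List String)) (feature_names : List String), Dom_generate_model_space_decomposition decomposition feature_names → Pre_generate_model_space_decomposition decomposition feature_names → Spec_generate_model_space_decomposition decomposition feature_names (generate_model_space_decomposition decomposition feature_names)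

-- ===== LEMMAS AND PROOFS =====

-- the per-state sweep is the map of the per-row sweep
theorem pv_fold_map_rows (es : List (Int × String)) (rows : List (String × List (String × Option Int))) :
    es.foldl (fun st iv => st.map (fun c => (c.1, c.2.map (pvStamp1 iv.1 iv.2)))) rows
      = rows.map (fun c => (c.1, es.foldl (fun r iv => r.map (pvStamp1 iv.1 iv.2)) c.2)) := by
  induction es generalizing rows with
  | nil => simp
  | cons e es ih => simp only [List.foldl_cons]; rw [ih]; simp [List.map_map, Function.comp]

-- the per-row sweep is the map of the per-slot sweep
theorem pv_fold_map_row (es : List (Int × String)) (row : List (String × Option Int)) :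
    es.foldl (fun r iv => r.map (pvStamp1 iv.1 iv.2)) row
      = row.map (fun s => es.foldl (fun s iv => pvStamp1 iv.1 iv.2 s) s) := by
  induction es generalizing row with
  | nil => simp
  | cons e es ih => simp only [List.foldl_cons]; rw [ih]; simp [List.map_map, Function.comp]

-- a filled slot is never overwritten
theorem pv_fold_some (es : List (Int × String)) (p : String) (v : Int) :
    es.foldl (fun s iv => pvStamp1 iv.1 iv.2 s) (p, some v) = (p, some v) := by
  induction es with
  | nil => rfl
  | cons e es ih =>
    have h : pvStamp1 e.1 e.2 (p, some v) = (p, some v) := by simp [pvStamp1]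
    simp only [List.foldl_cons, h]; exact ih

-- sweeping an empty slot fills it with the first index of its name
theorem pv_fold_slot (fn : List String) (s : Int) (p : String) :
    (PySem.List.enumerate fn s).foldl (fun sl iv => pvStamp1 iv.1 iv.2 sl) (p, none)
      = (p, (PySem.List.index? fn p).map (fun n => s + (n : Int))) := by
  induction fn generalizing s with
  | nil => simp [PySem.List.enumerate_nil]
  | cons x fn ih =>
    rw [PySem.List.enumerate_cons]
    simp only [List.foldl_cons]
    by_cases hxp : x = p
    · subst hxp
      have h1 : pvStamp1 s x (x, none) = (x, some s) := by simp [pvStamp1]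
      rw [h1, pv_fold_some, PySem.List.index?_cons_self]
      simp
    · have h1 : pvStamp1 s x (p, none) = (p, none) := by
        simp [pvStamp1, show (p == x) = false by simp [Ne.symm hxp]]
      rw [h1, ih, PySem.List.index?_cons_of_ne fn hxp]
      cases PySem.List.index? fn p with
      | none => simp
      | some n => simp; ring_nf

theorem generate_model_space_decomposition_spec : Claim_equal_generate_model_space_decomposition := by
  intro dec fn _hD hPre
  unfold Spec_generate_model_space_decomposition
  unfold generate_model_space_decomposition generate_model_space_decomposition_alt
  simp only []
  rw [pv_fold_map_rows]
  unfold pvRows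
  rw [List.map_map]
  simp only [Function.comp_def, pv_fold_map_row]
  rw [List.foldl_map]
  congr 1
  apply PySem.List.foldl_congr_mem
  intro acc c hc
  congr 1
  simp only [List.map_map, Function.comp_def]
  apply List.map_congr_left
  intro q hq
  have hmem : q ∈ fn := by
    unfold Pre_generate_model_space_decomposition at hPre
    simp only [List.all_eq_true] at hPre
    exact List.contains_iff_mem.mp (hPre c hc q hq)
  obtain ⟨k, hk⟩ := Option.isSome_iff_exists.mp ((PySem.List.index?_isSome_iff fn q).mpr hmem)
  rw [PySem.List.index?_eq_idxOf?] at hk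
  simp [pv_fold_slot fn 0 q, hk]
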